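-- pv_equiv track=rewrite | github.com/PhantomAlpaca28/TR-091-Linking-Lions- | backend/snippets.py | line_of_max_indent
-- ===== SOURCE A (Python) =====
-- def line_of_max_indent(lines: list[str]) -> int | None:
--     best_i = None
--     best_indent = -1
--     for i, line in enumerate(lines, start=1):
--         if not line.strip():
--             continue
--         indent = len(line) - len(line.lstrip())
--         if indent > best_indent:
--             best_indent = indent
--             best_i = i
--     return best_i
-- ===== SOURCE B (Python) =====
-- def line_of_max_indent(lines: list[str]) -> int | None:
--     # Two-pass: first compute the maximum indentation among non-blank lines,
--     # then return the 1-based number of the first line attaining it.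
--     indents = [len(l) - len(l.lstrip()) for l in lines if l.strip()]
--     if not indents:
--         return None
--     m = max(indents)
--     for i, line in enumerate(lines, start=1):
--         if line.strip() and len(line) - len(line.lstrip()) == m:
--             return i
-- ===== Notes on version B (the rewrite author's own statement) =====
-- stated objective: alternative
-- what changed: A's single accumulator loop tracking (best index, best indent) is replaced by a two-pass scheme: first reduce the non-blank lines to the maximum indent value, then find the first line whose indent equals it.
import Mathlib
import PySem

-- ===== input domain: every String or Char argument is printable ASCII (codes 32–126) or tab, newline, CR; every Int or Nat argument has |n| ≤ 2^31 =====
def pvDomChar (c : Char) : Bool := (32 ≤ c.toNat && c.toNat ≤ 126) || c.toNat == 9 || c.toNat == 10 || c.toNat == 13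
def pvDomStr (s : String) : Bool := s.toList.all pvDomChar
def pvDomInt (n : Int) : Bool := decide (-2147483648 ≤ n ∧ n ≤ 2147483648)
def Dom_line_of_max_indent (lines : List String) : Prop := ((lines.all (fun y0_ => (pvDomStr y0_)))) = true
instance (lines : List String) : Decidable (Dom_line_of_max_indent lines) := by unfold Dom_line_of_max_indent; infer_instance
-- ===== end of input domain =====

-- B replaces A's single best-so-far accumulator loop by two passes (max indent value, then first line attaining it); same O(n) cost, return value proved equal.

-- ===== PORT A =====
-- A's loop body: state (best_i, best_indent), one enumerated line p
def pvStepA (st : Option Int × Int) (p : Int × String) : Option Int × Int :=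
  if PySem.Str.strip p.2 = "" then st
  else
    let indent : Int := PySem.Str.len p.2 - PySem.Str.len (PySem.Str.lstrip p.2)
    if st.2 < indent then (some p.1, indent) else st

def line_of_max_indent (lines : List String) : Option Int :=
  ((PySem.List.enumerate lines 1).foldl pvStepA (none, -1)).1

-- ===== PORT B =====
-- B's second pass: first (1-based) enumerated line that is non-blank and has indent = m
def pvFindIndent (m : Int) (ps : List (Int × String)) : Option Int :=
  match ps with
  | [] => none
  | p :: rest =>
    if PySem.Str.strip p.2 ≠ "" ∧ PySem.Str.len p.2 - PySem.Str.len (PySem.Str.lstrip p.2) = m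
    then some p.1
    else pvFindIndent m rest

def line_of_max_indent_alt (lines : List String) : Option Int :=
  let indents :=
    (lines.filter (fun l => !(PySem.Str.strip l == ""))).map
      (fun l => PySem.Str.len l - PySem.Str.len (PySem.Str.lstrip l))
  match indents with
  | [] => none
  | a :: rest => pvFindIndent (rest.foldl max a) (PySem.List.enumerate lines 1)

-- ===== PRECONDITION & SPEC =====
def Spec_line_of_max_indent (lines : List String) (out : Option Int) : Prop := out = line_of_max_indent_alt lines
instance (lines : List String) (out : Option Int) : Decidable (Spec_line_of_max_indent lines out) := by unfold Spec_line_of_max_indent; infer_instance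

-- ===== CLAIM (what is proved, stated in full; the proofs are below) =====
def Claim_equal_line_of_max_indent : Prop := ∀ (lines : List String), Dom_line_of_max_indent lines → Spec_line_of_max_indent lines (line_of_max_indent lines)

-- ===== LEMMAS AND PROOFS =====

-- running maximum of the indents of the non-blank lines, seeded with m (the value A's accumulator reaches)
def pvMx (m : Int) (ls : List String) : Int :=
  ls.foldl (fun acc l => if PySem.Str.strip l = "" then acc
    else max acc (PySem.Str.len l - PySem.Str.len (PySem.Str.lstrip l))) m

lemma pvMx_cons (m : Int) (l : String) (ls : List String) :
    pvMx m (l :: ls) = pvMx (if PySem.Str.strip l = "" then m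
      else max m (PySem.Str.len l - PySem.Str.len (PySem.Str.lstrip l))) ls := rfl

lemma pvFindIndent_cons (m k : Int) (l : String) (rest : List (Int × String)) :
    pvFindIndent m ((k, l) :: rest)
      = if PySem.Str.strip l ≠ "" ∧ PySem.Str.len l - PySem.Str.len (PySem.Str.lstrip l) = m
        then some k else pvFindIndent m rest := rfl

lemma pvMx_ge (ls : List String) : ∀ m : Int, m ≤ pvMx m ls := by
  induction ls with
  | nil => intro m; exact le_refl m
  | cons l ls ih =>
    intro m
    rw [pvMx_cons]
    split_ifs with h
    · exact ih m
    · exact le_trans (le_max_left _ _) (ih _)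

lemma pvInd_nonneg (l : String) : 0 ≤ PySem.Str.len l - PySem.Str.len (PySem.Str.lstrip l) := by
  have h1 : (PySem.Str.lstrip l).toList.length ≤ l.toList.length := by
    rw [PySem.Str.toList_lstrip]
    exact List.length_dropWhile_le _ _
  simp only [PySem.Str.len_eq]
  omega

-- A's loop over the enumerated suffix, from an arbitrary state, computed in closed form
lemma pvStepA_mk (b : Option Int) (m k : Int) (l : String) :
    pvStepA (b, m) (k, l)
      = if PySem.Str.strip l = "" then (b, m)
        else if m < PySem.Str.len l - PySem.Str.len (PySem.Str.lstrip l)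
          then (some k, PySem.Str.len l - PySem.Str.len (PySem.Str.lstrip l)) else (b, m) := rfl

lemma pvFoldA (ls : List String) : ∀ (k : Int) (b : Option Int) (m : Int),
    (PySem.List.enumerate ls k).foldl pvStepA (b, m)
    = (if m < pvMx m ls then pvFindIndent (pvMx m ls) (PySem.List.enumerate ls k) else b, pvMx m ls) := by
  induction ls with
  | nil => intro k b m; simp [PySem.List.enumerate_nil, pvMx]
  | cons l ls ih =>
    intro k b m
    rw [PySem.List.enumerate_cons, List.foldl_cons, pvMx_cons, pvStepA_mk]
    by_cases hb : PySem.Str.strip l = ""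
    · -- blank line: skipped by both the loop and the find pass
      rw [if_pos hb, if_pos hb, ih]
      by_cases hc : m < pvMx m ls
      · rw [if_pos hc, if_pos hc, pvFindIndent_cons,
          if_neg (by intro h; exact h.1 hb)]
      · rw [if_neg hc, if_neg hc]
    · rw [if_neg hb, if_neg hb]
      set ind := PySem.Str.len l - PySem.Str.len (PySem.Str.lstrip l) with hdef
      by_cases hgt : m < ind
      · -- the accumulator is overtaken here
        have hmax : max m ind = ind := by omega
        rw [if_pos hgt, hmax, ih]
        have hM : ind ≤ pvMx ind ls := pvMx_ge ls ind
        rw [if_pos (show m < pvMx ind ls by omega), pvFindIndent_cons, ← hdef]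
        by_cases he : ind = pvMx ind ls
        · rw [if_pos (show PySem.Str.strip l ≠ "" ∧ ind = pvMx ind ls from ⟨hb, he⟩)]
          rw [if_neg (show ¬ ind < pvMx ind ls by omega)]
        · rw [if_neg (show ¬(PySem.Str.strip l ≠ "" ∧ ind = pvMx ind ls) from fun h => he h.2)]
          rw [if_pos (show ind < pvMx ind ls by omega)]
      · -- accumulator unchanged
        have hmax : max m ind = m := by omega
        rw [if_neg hgt, hmax, ih]
        by_cases hc : m < pvMx m ls
        · rw [if_pos hc, if_pos hc, pvFindIndent_cons, ← hdef]
          rw [if_neg (show ¬(PySem.Str.strip l ≠ "" ∧ ind = pvMx m ls) from fun h => by omega)]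
        · rw [if_neg hc, if_neg hc]

-- pvMx as a fold of max over B's indents list
lemma pvMx_eq_foldl (ls : List String) : ∀ m : Int,
    pvMx m ls = ((ls.filter (fun l => !(PySem.Str.strip l == ""))).map
      (fun l => PySem.Str.len l - PySem.Str.len (PySem.Str.lstrip l))).foldl max m := by
  induction ls with
  | nil => intro m; rfl
  | cons l ls ih =>
    intro m
    rw [pvMx_cons]
    by_cases hb : PySem.Str.strip l = ""
    · simp [hb, ih]
    · simp [hb, ih]

-- ===== VERDICT (by name: the statement is the Claim_ definition above) =====
theorem line_of_max_indent_spec : Claim_equal_line_of_max_indent := by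
  intro lines _
  unfold Spec_line_of_max_indent line_of_max_indent line_of_max_indent_alt
  rw [pvFoldA]
  rcases hfm : (lines.filter (fun l => !(PySem.Str.strip l == ""))).map
      (fun l => PySem.Str.len l - PySem.Str.len (PySem.Str.lstrip l)) with _ | ⟨a, rest⟩
  · -- no non-blank line: both return none
    have h0 : pvMx (-1) lines = -1 := by rw [pvMx_eq_foldl, hfm]; rfl
    simp [h0]
  · -- some non-blank line: the maximum is nonnegative, so the loop found it
    have ha : 0 ≤ a := by
      have hmem : a ∈ (lines.filter (fun l => !(PySem.Str.strip l == ""))).map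
          (fun l => PySem.Str.len l - PySem.Str.len (PySem.Str.lstrip l)) := by
        rw [hfm]; exact List.mem_cons_self
      obtain ⟨l, _, hl⟩ := List.mem_map.mp hmem
      rw [← hl]; exact pvInd_nonneg l
    have hM : pvMx (-1) lines = rest.foldl max a := by
      rw [pvMx_eq_foldl, hfm, List.foldl_cons]
      congr 1
      omega
    have hge : a ≤ rest.foldl max a := (PySem.List.le_foldl_max rest a).1
    simp only [hM]
    rw [if_pos (by omega)]
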